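-- pv_equiv track=rewrite | github.com/Auclown/algo-challenge-py | 061_house-of-cats/attempt.py | house_of_cats
-- ===== SOURCE A (Python) =====
-- def house_of_cats(legs):
--     cat = 0
--     human = 0
--
--     if (legs == 2):
--         return [1]
--
--     for i in range(legs, 0, -1):
--         if i % 2 == 0 and i != 0:
--             human += 1
--
--     for j in range(legs, 0, -1):
--         if j % 4 == 0 and j != 0:
--             cat += 1
--
--     return [cat, human]
-- ===== SOURCE B (Python) =====
-- def house_of_cats(legs):
--     if legs == 2:
--         return [1]
--     n = max(legs, 0)
--     return [n // 4, n // 2]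
-- ===== Notes on version B (the rewrite author's own statement) =====
-- stated objective: faster
-- what changed: Replaced the two O(legs) counting loops with the closed forms legs//4 and legs//2 (clamped at 0), keeping the legs==2 special case.
import Mathlib
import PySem

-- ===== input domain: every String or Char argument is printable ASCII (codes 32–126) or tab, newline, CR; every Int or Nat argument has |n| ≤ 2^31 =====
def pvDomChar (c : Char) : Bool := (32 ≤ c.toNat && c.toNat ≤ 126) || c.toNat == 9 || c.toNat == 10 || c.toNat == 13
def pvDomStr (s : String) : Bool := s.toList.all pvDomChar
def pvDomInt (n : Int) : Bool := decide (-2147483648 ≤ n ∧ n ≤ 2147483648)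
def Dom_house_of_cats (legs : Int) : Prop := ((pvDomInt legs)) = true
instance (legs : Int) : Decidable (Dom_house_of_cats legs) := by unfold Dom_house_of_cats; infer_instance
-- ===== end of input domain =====

-- B replaces A's two counting loops by the closed forms legs//4 and legs//2 (clamped at 0): O(1) instead of O(legs).

-- ===== PORT A =====
def house_of_cats (legs : Int) : List Int :=
  let cat : Int := 0
  let human : Int := 0
  if legs == 2 then [1]
  else
    let human := (PySem.List.pyRange legs 0 (-1)).foldl
      (fun h i => if PySem.Int.mod i 2 == 0 && decide (i ≠ 0) then h + 1 else h) human
    let cat := (PySem.List.pyRange legs 0 (-1)).foldl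
      (fun c j => if PySem.Int.mod j 4 == 0 && decide (j ≠ 0) then c + 1 else c) cat
    [cat, human]

-- ===== PORT B =====
def house_of_cats_alt (legs : Int) : List Int :=
  if legs == 2 then [1]
  else
    let n := max legs 0
    [PySem.Int.floordiv n 4, PySem.Int.floordiv n 2]

-- ===== PRECONDITION & SPEC =====
def Spec_house_of_cats (legs : Int) (out : List Int) : Prop := out = house_of_cats_alt legs
instance (legs : Int) (out : List Int) : Decidable (Spec_house_of_cats legs out) := by unfold Spec_house_of_cats; infer_instance

-- ===== CLAIM (what is proved, stated in full; the proofs are below) =====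
def Claim_equal_house_of_cats : Prop := ∀ (legs : Int), Dom_house_of_cats legs → Spec_house_of_cats legs (house_of_cats legs)

-- ===== LEMMAS AND PROOFS =====

-- counting the multiples of d among n, n-1, …, 1 yields n / d
theorem countP_mul_pyRange (d : Nat) (n : Nat) :
    (PySem.List.pyRange (n : Int) 0 (-1)).countP
      (fun i => PySem.Int.mod i (d : Int) == 0 && decide (i ≠ 0)) = n / d := by
  induction n with
  | zero => simp [PySem.List.pyRange_neg_one_eq_nil (by omega : (0:Int) ≤ 0)]
  | succ n ih =>
    rw [show ((n + 1 : Nat) : Int) = (n : Int) + 1 by push_cast; ring]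
    rw [PySem.List.pyRange_neg_one_cons (by omega : (0:Int) < (n : Int) + 1)]
    rw [show ((n : Int) + 1 - 1) = (n : Int) by ring]
    rw [List.countP_cons, ih]
    have hmod : PySem.Int.mod ((n : Int) + 1) (d : Int) = (((n + 1) % d : Nat) : Int) := by
      rw [show ((n : Int) + 1) = ((n + 1 : Nat) : Int) by push_cast; ring]
      exact PySem.Int.mod_natCast (n + 1) d
    rw [Nat.succ_div]
    have hne : ((n : Int) + 1) ≠ 0 := by omega
    by_cases h0 : (n + 1) % d = 0
    · have hdvd : d ∣ (n + 1) := Nat.dvd_of_mod_eq_zero h0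
      simp [hmod, h0, hne, hdvd]
    · have hdvd : ¬ d ∣ (n + 1) := fun h => h0 (Nat.mod_eq_zero_of_dvd h)
      have hdvdZ : ¬ (d : Int) ∣ ((n : Int) + 1) := by
        rw [show ((n : Int) + 1) = ((n + 1 : Nat) : Int) by push_cast; ring,
            Int.natCast_dvd_natCast]
        exact hdvd
      simp [hmod, hne, hdvd, hdvdZ]

theorem foldl_count_mul (d : Nat) (legs : Int) :
    (PySem.List.pyRange legs 0 (-1)).foldl
      (fun h i => if PySem.Int.mod i (d : Int) == 0 && decide (i ≠ 0) then h + 1 else h) 0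
      = PySem.Int.floordiv (max legs 0) (d : Int) := by
  rw [PySem.List.foldl_count_if]
  by_cases hpos : 0 < legs
  · have : legs = ((legs.toNat : Nat) : Int) := by omega
    rw [this, countP_mul_pyRange d legs.toNat,
        show max ((legs.toNat : Nat) : Int) 0 = ((legs.toNat : Nat) : Int) by omega,
        PySem.Int.floordiv_natCast]
    simp
  · rw [PySem.List.pyRange_neg_one_eq_nil (by omega : legs ≤ 0),
        show max legs 0 = ((0 : Nat) : Int) by omega, PySem.Int.floordiv_natCast]
    simp

-- ===== VERDICT (by name: the statement is the Claim_ definition above) =====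
theorem house_of_cats_spec : Claim_equal_house_of_cats := by
  intro legs _
  unfold Spec_house_of_cats house_of_cats house_of_cats_alt
  by_cases h2 : legs = 2
  · simp [h2]
  · simp only [beq_iff_eq, h2, if_false]
    rw [show ((2:Int)) = ((2 : Nat) : Int) by norm_num] -- align numerals with the lemma's cast
    rw [show ((4:Int)) = ((4 : Nat) : Int) by norm_num]
    rw [foldl_count_mul 2 legs, foldl_count_mul 4 legs]
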